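-- pv_equiv track=rewrite | github.com/dschrengost/projections-v2 | scripts/optimizer/verify_min_uniques.py | verify_consecutive_min_uniques
-- ===== SOURCE A (Python) =====
-- from typing import List, Tuple, Sequence
--
-- def verify_consecutive_min_uniques(
--     lineups: Sequence[Sequence[str]],
--     min_uniques: int,
--     lineup_size: int | None = None,
-- ) -> Tuple[int, int, List[Tuple[int, int, int]]]:
--     """Check that each lineup differs from the previous by at least `min_uniques` players.
--
--     Returns (n_checked, min_changes, violations), where violations is a list of
--     tuples (index, changes, overlap) for each failed consecutive pair (index is the second lineup's index).
--     """
--     n = len(lineups)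
--     if n <= 1:
--         return 0, 0, []
--     viols: List[Tuple[int, int, int]] = []
--     min_changes = 1_000_000
--     for i in range(1, n):
--         a = set(lineups[i - 1])
--         b = set(lineups[i])
--         lsz = lineup_size or max(len(a), len(b))
--         overlap = len(a & b)
--         changes = lsz - overlap
--         min_changes = min(min_changes, changes)
--         if changes < min_uniques:
--             viols.append((i, changes, overlap))
--     return n - 1, (min_changes if min_changes != 1_000_000 else 0), viols
-- ===== SOURCE B (Python) =====
-- from typing import List, Tuple, Sequence
--
--
-- def _merge_overlap(xs, ys):
--     """Number of common elements of two strictly increasing lists (two-pointer merge)."""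
--     i = j = k = 0
--     while i < len(xs) and j < len(ys):
--         if xs[i] == ys[j]:
--             k += 1
--             i += 1
--             j += 1
--         elif xs[i] < ys[j]:
--             i += 1
--         else:
--             j += 1
--     return k
--
--
-- def _pair_stat(i, prev, cur, lineup_size):
--     """Stat tuple for the consecutive pair whose second lineup has index i
--     (prev, cur are the sorted distinct player lists)."""
--     overlap = _merge_overlap(prev, cur)
--     lsz = lineup_size or max(len(prev), len(cur))
--     return (i, lsz - overlap, overlap)
--
--
-- def verify_consecutive_min_uniques(
--     lineups: Sequence[Sequence[str]],
--     min_uniques: int,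
--     lineup_size: int | None = None,
-- ) -> Tuple[int, int, List[Tuple[int, int, int]]]:
--     n = len(lineups)
--     if n <= 1:
--         return 0, 0, []
--     uniq = [sorted(set(lu)) for lu in lineups]
--     stats = [_pair_stat(i, uniq[i - 1], uniq[i], lineup_size) for i in range(1, n)]
--     min_changes = min(c for _, c, _ in stats)
--     viols = [t for t in stats if t[1] < min_uniques]
--     return n - 1, min_changes, viols
-- ===== Notes on version B (the rewrite author's own statement) =====
-- stated objective: alternative
-- what changed: Replaces A's hash-set intersection inside a single accumulator loop by a sort-and-merge pipeline: each lineup's distinct players are sorted once, each adjacent pair's overlap is counted by a two-pointer merge of the two sorted lists, and min_changes / violations are then derived by separate min() and filter passes over the collected per-pair stats.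
-- intended difference: On inputs with at least two lineups where every consecutive pair needs at least 1,000,000 changes (e.g. a huge explicit lineup_size), A's sentinel-initialised running min reports min_changes = 0 while B reports the true minimum number of changes, which is the intended value. — e.g. on verify_consecutive_min_uniques([["a"], ["b"]], 0, some 1000000): A returns (1, 0, []), B returns (1, 1000000, [])
import Mathlib
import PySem

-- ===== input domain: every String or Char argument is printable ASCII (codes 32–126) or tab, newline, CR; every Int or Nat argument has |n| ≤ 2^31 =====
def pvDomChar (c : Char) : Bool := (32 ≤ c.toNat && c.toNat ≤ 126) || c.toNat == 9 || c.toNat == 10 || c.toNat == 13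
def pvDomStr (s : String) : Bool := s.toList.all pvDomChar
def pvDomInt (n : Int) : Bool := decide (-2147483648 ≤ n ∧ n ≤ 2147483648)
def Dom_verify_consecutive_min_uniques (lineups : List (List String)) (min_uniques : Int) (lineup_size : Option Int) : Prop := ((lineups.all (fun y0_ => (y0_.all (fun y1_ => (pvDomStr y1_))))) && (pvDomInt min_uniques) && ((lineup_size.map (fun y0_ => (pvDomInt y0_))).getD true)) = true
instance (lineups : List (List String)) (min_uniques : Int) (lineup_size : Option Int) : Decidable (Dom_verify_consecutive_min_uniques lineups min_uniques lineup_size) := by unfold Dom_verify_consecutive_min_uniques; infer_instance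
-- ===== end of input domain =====

-- B replaces A's per-pair hash-set intersection inside one accumulator loop by a sort-and-merge
-- pipeline (sorted distinct lists once, two-pointer overlap count, then staged min/filter); objective: alternative.
-- On inputs where every consecutive pair needs >= 1,000,000 changes A's sentinel caps min_changes to 0; B reports the true minimum (D_ below).


-- ===== PORT A =====
-- literal port of A's loop body: for i in range(1, n) with running min and append-on-violation
def vcmuBodyA (lineups : List (List String)) (min_uniques : Int) (lineup_size : Option Int)
    (st : Int × List (Int × Int × Int)) (i : Int) : Int × List (Int × Int × Int) :=
  let a : PySem.Set String := PySem.Set.ofList (PySem.List.pyGetD lineups (i - 1) [])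
  let b : PySem.Set String := PySem.Set.ofList (PySem.List.pyGetD lineups i [])
  -- `lineup_size or max(len(a), len(b))`: falsy (None / 0) falls through to the max
  let lsz : Int := match lineup_size with
    | some v => if v = 0 then max (PySem.Set.len a) (PySem.Set.len b) else v
    | none => max (PySem.Set.len a) (PySem.Set.len b)
  let overlap : Int := PySem.Set.len (PySem.Set.inter a b)
  let changes : Int := lsz - overlap
  (min st.1 changes, if changes < min_uniques then st.2 ++ [(i, changes, overlap)] else st.2)

def verify_consecutive_min_uniques (lineups : List (List String)) (min_uniques : Int) (lineup_size : Option Int) : Int × Int × (List (Int × Int × Int)) :=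
  let n : Int := lineups.length
  if n ≤ 1 then (0, 0, [])
  else
    let st := (PySem.List.pyRange 1 n).foldl (vcmuBodyA lineups min_uniques lineup_size) (1000000, [])
    (n - 1, if st.1 ≠ 1000000 then st.1 else 0, st.2)

-- ===== PORT B =====
-- Source B's _merge_overlap: the index-based two-pointer while loop, ported as the
-- structural recursion on the two lists it walks (exact: each branch advances the same pointer)
-- fuel = xs.length + ys.length: every loop iteration advances at least one pointer,
-- so the fuel never runs out (structural recursion keeps the definition kernel-reducible)
def vcmuMergeGo : Nat → List String → List String → Int
  | fuel + 1, x :: xs, y :: ys =>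
      if x == y then 1 + vcmuMergeGo fuel xs ys
      else if PySem.Chars.strLt x.toList y.toList then vcmuMergeGo fuel xs (y :: ys)  -- Python's s < t on str = code-point lex
      else vcmuMergeGo fuel (x :: xs) ys
  | _, _, _ => 0

def vcmuMergeOverlap (xs ys : List String) : Int := vcmuMergeGo (xs.length + ys.length) xs ys

-- Source B's _pair_stat: stat tuple for the pair whose second lineup has index i
def vcmuPairStat (i : Int) (prev cur : List String) (lineup_size : Option Int) : Int × Int × Int :=
  let overlap := vcmuMergeOverlap prev cur
  -- `lineup_size or max(len(prev), len(cur))`: falsy (None / 0) falls through to the max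
  let lsz : Int := match lineup_size with
    | some v => if v = 0 then max (prev.length : Int) (cur.length : Int) else v
    | none => max (prev.length : Int) (cur.length : Int)
  (i, lsz - overlap, overlap)

def verify_consecutive_min_uniques_alt (lineups : List (List String)) (min_uniques : Int) (lineup_size : Option Int) : Int × Int × (List (Int × Int × Int)) :=
  let n : Int := lineups.length
  if n ≤ 1 then (0, 0, [])
  else
    -- uniq = [sorted(set(lu)) for lu in lineups]
    let uniq : List (List String) := lineups.map (fun lu => PySem.List.sorted (PySem.Set.ofList lu) (fun x => x) false)
    let stats : List (Int × Int × Int) := (PySem.List.pyRange 1 n).map (fun i =>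
      vcmuPairStat i (PySem.List.pyGetD uniq (i - 1) []) (PySem.List.pyGetD uniq i []) lineup_size)
    -- min(c for _, c, _ in stats): stats is nonempty here (n ≥ 2), so the .getD 0 is unreachable
    let min_changes : Int := (PySem.List.min? (stats.map (fun t => t.2.1)) (fun c => c)).getD 0
    let viols := stats.filter (fun t => t.2.1 < min_uniques)
    (n - 1, min_changes, viols)

-- ===== PRECONDITION & SPEC =====
-- shape helpers for D_ (inputs only): distinct-player count of a lineup, and the
-- number of distinct players two adjacent lineups share
def vcmuDistinct (lu : List String) : Int := lu.dedup.length
def vcmuOverlapCount (p c : List String) : Int := p.dedup.countP fun x => c.contains x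

-- On inputs with ≥ 2 lineups where every consecutive pair needs ≥ 1,000,000 changes, A's
-- sentinel-initialised running min reports min_changes = 0; B reports the true minimum, the intended value.
def D_verify_consecutive_min_uniques (lineups : List (List String)) (min_uniques : Int) (lineup_size : Option Int) : Prop :=
  2 ≤ lineups.length ∧ ∀ k < lineups.length - 1,
    1000000 + vcmuOverlapCount (lineups.getD k []) (lineups.getD (k + 1) [])
      ≤ (if lineup_size.getD 0 = 0
         then max (vcmuDistinct (lineups.getD k [])) (vcmuDistinct (lineups.getD (k + 1) []))
         else lineup_size.getD 0)
instance (lineups : List (List String)) (min_uniques : Int) (lineup_size : Option Int) : Decidable (D_verify_consecutive_min_uniques lineups min_uniques lineup_size) := by unfold D_verify_consecutive_min_uniques; infer_instance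

def Spec_verify_consecutive_min_uniques (lineups : List (List String)) (min_uniques : Int) (lineup_size : Option Int) (out : Int × Int × (List (Int × Int × Int))) : Prop := ¬ D_verify_consecutive_min_uniques lineups min_uniques lineup_size → out = verify_consecutive_min_uniques_alt lineups min_uniques lineup_size
instance (lineups : List (List String)) (min_uniques : Int) (lineup_size : Option Int) (out : Int × Int × (List (Int × Int × Int))) : Decidable (Spec_verify_consecutive_min_uniques lineups min_uniques lineup_size out) := by unfold Spec_verify_consecutive_min_uniques; infer_instance

def pvDiffWitness_verify_consecutive_min_uniques : List (List String) × Int × Option Int := ([["a"], ["b"]], 0, some 1000000)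
def pvDiffWitnessOut_verify_consecutive_min_uniques : (Int × Int × (List (Int × Int × Int))) × (Int × Int × (List (Int × Int × Int))) := ((1, 0, []), (1, 1000000, []))

-- ===== CLAIM (what is proved, stated in full; the proofs are below) =====
def Claim_unchanged_verify_consecutive_min_uniques : Prop := ∀ (lineups : List (List String)) (min_uniques : Int) (lineup_size : Option Int), Dom_verify_consecutive_min_uniques lineups min_uniques lineup_size → Spec_verify_consecutive_min_uniques lineups min_uniques lineup_size (verify_consecutive_min_uniques lineups min_uniques lineup_size)
def Claim_changed_verify_consecutive_min_uniques : Prop := Dom_verify_consecutive_min_uniques (pvDiffWitness_verify_consecutive_min_uniques.1) (pvDiffWitness_verify_consecutive_min_uniques.2.1) (pvDiffWitness_verify_consecutive_min_uniques.2.2) ∧ D_verify_consecutive_min_uniques (pvDiffWitness_verify_consecutive_min_uniques.1) (pvDiffWitness_verify_consecutive_min_uniques.2.1) (pvDiffWitness_verify_consecutive_min_uniques.2.2) ∧ verify_consecutive_min_uniques (pvDiffWitness_verify_consecutive_min_uniques.1) (pvDiffWitness_verify_consecutive_min_uniques.2.1) (pvDiffWitness_verify_consecutive_min_uniques.2.2)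 = pvDiffWitnessOut_verify_consecutive_min_uniques.1 ∧ verify_consecutive_min_uniques_alt (pvDiffWitness_verify_consecutive_min_uniques.1) (pvDiffWitness_verify_consecutive_min_uniques.2.1) (pvDiffWitness_verify_consecutive_min_uniques.2.2) = pvDiffWitnessOut_verify_consecutive_min_uniques.2 ∧ pvDiffWitnessOut_verify_consecutive_min_uniques.1 ≠ pvDiffWitnessOut_verify_consecutive_min_uniques.2
def Claim_exact_verify_consecutive_min_uniques : Prop := ∀ (lineups : List (List String)) (min_uniques : Int) (lineup_size : Option Int), Dom_verify_consecutive_min_uniques lineups min_uniques lineup_size → D_verify_consecutive_min_uniques lineups min_uniques lineup_size → verify_consecutive_min_uniques lineups min_uniques lineup_size ≠ verify_consecutive_min_uniques_alt lineups min_uniques lineup_size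

-- ===== LEMMAS AND PROOFS =====

-- A's per-pair triple, indexed by the 0-based position of the pair's first lineup
def vcmuTri (lineups : List (List String)) (lineup_size : Option Int) (k : Nat) : Int × Int × Int :=
  let p : PySem.Set String := PySem.Set.ofList (lineups.getD k [])
  let c : PySem.Set String := PySem.Set.ofList (lineups.getD (k + 1) [])
  let lsz : Int := match lineup_size with
    | some v => if v = 0 then max (PySem.Set.len p) (PySem.Set.len c) else v
    | none => max (PySem.Set.len p) (PySem.Set.len c)
  (1 + (k : Int), lsz - PySem.Set.len (PySem.Set.inter p c), PySem.Set.len (PySem.Set.inter p c))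

-- D_'s per-pair inequality says exactly that A's k-th change count is at least 1,000,000
theorem vcmu_ofList_length (p : List String) :
    (PySem.Set.ofList p).length = p.dedup.length := by
  have hperm : (PySem.Set.ofList p).Perm p.dedup := by
    rw [List.perm_ext_iff_of_nodup (PySem.Set.nodup_ofList p) p.nodup_dedup]
    intro x
    simp [PySem.Set.mem_ofList]
  exact hperm.length_eq

theorem vcmu_inter_length (p c : List String) :
    (PySem.Set.inter (PySem.Set.ofList p) (PySem.Set.ofList c)).length
      = (p.dedup.filter (fun x => c.contains x)).length := by
  have hperm : (PySem.Set.inter (PySem.Set.ofList p) (PySem.Set.ofList c)).Perm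
      (p.dedup.filter (fun x => c.contains x)) := by
    rw [List.perm_ext_iff_of_nodup (PySem.Set.nodup_inter _ _ (PySem.Set.nodup_ofList p))
      (p.nodup_dedup.filter _)]
    intro x
    simp [PySem.Set.mem_inter, PySem.Set.mem_ofList]
  exact hperm.length_eq

theorem vcmu_changes_iff (lineups : List (List String)) (ls : Option Int) (k : Nat) :
    (1000000 + vcmuOverlapCount (lineups.getD k []) (lineups.getD (k + 1) [])
      ≤ (if ls.getD 0 = 0
         then max (vcmuDistinct (lineups.getD k [])) (vcmuDistinct (lineups.getD (k + 1) []))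
         else ls.getD 0))
    ↔ 1000000 ≤ (vcmuTri lineups ls k).2.1 := by
  unfold vcmuOverlapCount vcmuDistinct vcmuTri
  rw [List.countP_eq_length_filter]
  have h1 := vcmu_ofList_length (lineups.getD k [])
  have h2 := vcmu_ofList_length (lineups.getD (k + 1) [])
  have h3 := vcmu_inter_length (lineups.getD k []) (lineups.getD (k + 1) [])
  cases ls with
  | none =>
    simp only [Option.getD_none, PySem.Set.len, h1, h2, h3, if_true]
    omega
  | some v =>
    by_cases hv : v = 0
    · simp only [hv, Option.getD_some, PySem.Set.len, h1, h2, h3, if_true]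
      omega
    · simp only [Option.getD_some, PySem.Set.len, h1, h2, h3, hv, ite_false]
      omega

-- A's fold step-- A's fold step expressed on a precomputed triple
def vcmuG (min_uniques : Int) (st : Int × List (Int × Int × Int)) (t : Int × Int × Int) :
    Int × List (Int × Int × Int) :=
  (min st.1 t.2.1, if t.2.1 < min_uniques then st.2 ++ [t] else st.2)

theorem vcmu_foldl_min_le : ∀ (cs : List Int) (c a : Int), a ∈ cs → cs.foldl min c ≤ a
  | x :: cs, c, a, h => by
    rcases List.mem_cons.1 h with rfl | h
    · calc cs.foldl min (min c a) ≤ min c a := by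
            clear h
            induction cs generalizing c a with
            | nil => simp
            | cons y ys ih => exact le_trans (ih (min c a) y) (min_le_left _ _)
          _ ≤ a := min_le_right _ _
    · exact vcmu_foldl_min_le cs (min c x) a h

theorem vcmu_le_foldl_min : ∀ (cs : List Int) (b c : Int), b ≤ c → (∀ a ∈ cs, b ≤ a) →
    b ≤ cs.foldl min c
  | [], b, c, hc, _ => hc
  | x :: cs, b, c, hc, h => by
    exact vcmu_le_foldl_min cs b (min c x) (le_min hc (h x (by simp)))
      (fun a ha => h a (by simp [ha]))

theorem vcmu_min_fold : ∀ (cs : List Int) (c : Int),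
    PySem.List.min? (c :: cs) (fun x => x) = some (cs.foldl min c)
  | [], c => by simp [PySem.List.min?]
  | x :: cs, c => by
    have := vcmu_min_fold cs (min c x)
    simp only [PySem.List.min?, List.foldl_cons] at this ⊢
    rw [← this]
    congr 2
    by_cases h : x < c <;> simp [h, min_def]

theorem vcmu_foldl_min : ∀ (cs : List Int) (a b : Int),
    cs.foldl min (min a b) = min a (cs.foldl min b)
  | [], a, b => by simp
  | x :: cs, a, b => by
    simp only [List.foldl_cons, min_assoc]
    exact vcmu_foldl_min cs a (min b x)

-- the two-pointer merge counts the common elements of two strictly increasing lists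
theorem vcmuMergeGo_eq : ∀ (f : Nat) (xs ys : List String), xs.length + ys.length ≤ f →
    xs.Pairwise (· < ·) → ys.Pairwise (· < ·) →
    vcmuMergeGo f xs ys = ((xs.filter (fun a => decide (a ∈ ys))).length : Int)
  | f, [], ys, _, _, _ => by cases f <;> simp [vcmuMergeGo]
  | f, x :: xs, [], _, _, _ => by cases f <;> simp [vcmuMergeGo]
  | 0, x :: xs, y :: ys, hf, _, _ => by simp at hf
  | f + 1, x :: xs, y :: ys, hf, hx, hy => by
    simp only [List.length_cons] at hf
    have hx' := (List.pairwise_cons.1 hx).2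
    have hy' := (List.pairwise_cons.1 hy).2
    have hxlt := (List.pairwise_cons.1 hx).1
    have hylt := (List.pairwise_cons.1 hy).1
    by_cases hxy : x = y
    · subst hxy
      rw [vcmuMergeGo, if_pos (by simp)]
      rw [vcmuMergeGo_eq f xs ys (by omega) hx' hy']
      have hfx : (x :: xs).filter (fun a => decide (a ∈ x :: ys))
          = x :: xs.filter (fun a => decide (a ∈ ys)) := by
        rw [List.filter_cons, if_pos (by simp)]
        congr 1
        apply List.filter_congr
        intro a ha
        have hxa := hxlt a ha
        simp only [decide_eq_decide, List.mem_cons]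
        constructor
        · rintro (rfl | h)
          · exact absurd hxa (lt_irrefl a)
          · exact h
        · exact Or.inr
      rw [hfx]
      simp only [List.length_cons]
      push_cast
      ring
    · by_cases hlt : x < y
      · rw [vcmuMergeGo, if_neg (by simpa using hxy),
          if_pos (by simpa [PySem.Chars.strLt] using hlt)]
        rw [vcmuMergeGo_eq f xs (y :: ys) (by simp only [List.length_cons]; omega) hx' hy]
        have hnm : x ∉ y :: ys := by
          intro hmem
          rcases List.mem_cons.1 hmem with rfl | hmem
          · exact hxy rfl
          · exact absurd (lt_trans hlt (hylt x hmem)) (lt_irrefl x)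
        rw [List.filter_cons, if_neg (by simpa using hnm)]
      · have hgt : y < x := by
          rcases lt_trichotomy x y with h | h | h
          · exact absurd h hlt
          · exact absurd h hxy
          · exact h
        rw [vcmuMergeGo, if_neg (by simpa using hxy),
          if_neg (by simpa [PySem.Chars.strLt] using hlt)]
        rw [vcmuMergeGo_eq f (x :: xs) ys (by simp only [List.length_cons]; omega) hx hy']
        congr 2
        apply List.filter_congr
        intro a ha
        have hya : y < a := by
          rcases List.mem_cons.1 ha with rfl | ha
          · exact hgt
          · exact lt_trans hgt (hxlt a ha)
        simp only [decide_eq_decide, List.mem_cons]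
        constructor
        · exact Or.inr
        · rintro (rfl | h)
          · exact absurd hya (lt_irrefl a)
          · exact h

-- B's merge overlap of the two sorted distinct lists = A's set-intersection size
theorem vcmuMergeOverlap_spec (p c : List String) :
    vcmuMergeOverlap (PySem.List.sorted (PySem.Set.ofList p) (fun x => x) false)
        (PySem.List.sorted (PySem.Set.ofList c) (fun x => x) false)
      = PySem.Set.len (PySem.Set.inter (PySem.Set.ofList p) (PySem.Set.ofList c)) := by
  rw [vcmuMergeOverlap, vcmuMergeGo_eq _ _ _ le_rfl
    (by simpa using PySem.List.sorted_ofList_pairwise_lt (xs := p))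
    (by simpa using PySem.List.sorted_ofList_pairwise_lt (xs := c))]
  have hmem : (PySem.List.sorted (PySem.Set.ofList p) (fun x => x) false).filter
        (fun a => decide (a ∈ PySem.List.sorted (PySem.Set.ofList c) (fun x => x) false))
      = (PySem.List.sorted (PySem.Set.ofList p) (fun x => x) false).filter
        (fun a => PySem.Set.contains (PySem.Set.ofList c) a) := by
    apply List.filter_congr
    intro a _
    simp only [PySem.List.mem_sorted]
    rw [Bool.eq_iff_iff]
    simp
  rw [hmem]
  have hperm : ((PySem.List.sorted (PySem.Set.ofList p) (fun x => x) false).filter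
        (fun a => PySem.Set.contains (PySem.Set.ofList c) a)).Perm
      ((PySem.Set.ofList p).filter (fun a => PySem.Set.contains (PySem.Set.ofList c) a)) :=
    (PySem.List.sorted_perm (xs := PySem.Set.ofList p) (key := fun x => x)
      (rev := false)).filter _
  rw [List.Perm.length_eq hperm]
  simp [PySem.Set.inter, PySem.Set.len]

theorem vcmu_foldl_min_le_init : ∀ (cs : List Int) (c : Int), cs.foldl min c ≤ c
  | [], c => le_rfl
  | x :: cs, c => le_trans (vcmu_foldl_min_le_init cs (min c x)) (min_le_left _ _)

-- A's loop body at index 1 + k is the fold step vcmuG on the k-th precomputed triple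
theorem vcmu_bodyA_eq (lineups : List (List String)) (mu : Int) (ls : Option Int)
    (acc : Int × List (Int × Int × Int)) (k : Nat) :
    vcmuBodyA lineups mu ls acc (1 + (k : Int)) = vcmuG mu acc (vcmuTri lineups ls k) := by
  unfold vcmuBodyA vcmuG vcmuTri
  have e1 : (1 : Int) + (k : Int) - 1 = ((k : Nat) : Int) := by ring
  have e2 : (1 : Int) + (k : Int) = ((k + 1 : Nat) : Int) := by push_cast; ring
  rw [e1, PySem.List.pyGetD_natCast]
  rw [e2, PySem.List.pyGetD_natCast]

-- both ports, evaluated on an input with at least two lineups, over the common triple list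
theorem vcmu_eval (lineups : List (List String)) (mu : Int) (ls : Option Int)
    (h2 : 2 ≤ lineups.length) :
    ∃ t0 tl,
      (List.range (lineups.length - 1)).map (vcmuTri lineups ls) = t0 :: tl ∧
      verify_consecutive_min_uniques lineups mu ls
        = ((lineups.length : Int) - 1,
           (if min 1000000 ((tl.map (fun t => t.2.1)).foldl min t0.2.1) ≠ 1000000
            then min 1000000 ((tl.map (fun t => t.2.1)).foldl min t0.2.1) else 0),
           (t0 :: tl).filter (fun t => t.2.1 < mu)) ∧
      verify_consecutive_min_uniques_alt lineups mu ls
        = ((lineups.length : Int) - 1,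
           (tl.map (fun t => t.2.1)).foldl min t0.2.1,
           (t0 :: tl).filter (fun t => t.2.1 < mu)) := by
  have hn : 1 < (lineups.length : Int) := by exact_mod_cast h2
  have hnle : ¬ ((lineups.length : Int) ≤ 1) := by omega
  -- pyRange 1 n as a mapped Nat range
  have hrange : PySem.List.pyRange 1 (lineups.length : Int) 1
      = (List.range (lineups.length - 1)).map (fun k : Nat => 1 + (k : Int)) := by
    rw [PySem.List.pyRange_of_pos 1 (lineups.length : Int) one_pos]
    rw [if_pos hn]
    have : (((lineups.length : Int) - 1 + 1 - 1) / 1).toNat = lineups.length - 1 := by omega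
    rw [this]
    simp
  -- the triple list is nonempty
  obtain ⟨t0, tl, hPeq⟩ : ∃ t0 tl,
      (List.range (lineups.length - 1)).map (vcmuTri lineups ls) = t0 :: tl := by
    cases hPcases : (List.range (lineups.length - 1)).map (vcmuTri lineups ls) with
    | nil =>
      exfalso
      have := congrArg List.length hPcases
      simp at this
      omega
    | cons a l => exact ⟨a, l, rfl⟩
  refine ⟨t0, tl, hPeq, ?_, ?_⟩
  · -- PORT A
    unfold verify_consecutive_min_uniques
    rw [if_neg hnle]
    have hA : (PySem.List.pyRange 1 (lineups.length : Int) 1).foldl (vcmuBodyA lineups mu ls) (1000000, [])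
        = ((List.range (lineups.length - 1)).map (vcmuTri lineups ls)).foldl (vcmuG mu) (1000000, []) := by
      rw [hrange, List.foldl_map, List.foldl_map]
      apply PySem.List.foldl_congr_mem
      intro acc k _
      exact vcmu_bodyA_eq lineups mu ls acc k
    rw [hA, hPeq]
    rw [show vcmuG mu = (fun st t => (min st.1 t.2.1, if t.2.1 < mu then st.2 ++ [t] else st.2)) from rfl]
    rw [PySem.List.foldl_prod_mk (fun (m : Int) (t : Int × Int × Int) => min m t.2.1)
      (fun acc (t : Int × Int × Int) => if t.2.1 < mu then acc ++ [t] else acc) (t0 :: tl) 1000000 []]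
    have hfilter : List.foldl (fun acc (t : Int × Int × Int) => if t.2.1 < mu then acc ++ [t] else acc) [] (t0 :: tl)
        = (t0 :: tl).filter (fun t => t.2.1 < mu) := by
      have := PySem.List.foldl_append_if (fun (t : Int × Int × Int) => decide (t.2.1 < mu)) id (t0 :: tl) []
      simpa using this
    have hminfold : List.foldl (fun (m : Int) (t : Int × Int × Int) => min m t.2.1) 1000000 (t0 :: tl)
        = min 1000000 ((tl.map (fun (t : Int × Int × Int) => t.2.1)).foldl min t0.2.1) := by
      rw [show List.foldl (fun (m : Int) (t : Int × Int × Int) => min m t.2.1) 1000000 (t0 :: tl)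
          = List.foldl min 1000000 ((t0 :: tl).map (fun t => t.2.1)) from (List.foldl_map).symm]
      rw [List.map_cons, List.foldl_cons, vcmu_foldl_min]
    rw [hfilter, hminfold]
  · -- PORT B
    unfold verify_consecutive_min_uniques_alt
    rw [if_neg hnle]
    have hB : ((PySem.List.pyRange 1 (lineups.length : Int) 1).map (fun i =>
        vcmuPairStat i
          (PySem.List.pyGetD (lineups.map (fun lu => PySem.List.sorted (PySem.Set.ofList lu) (fun x => x) false)) (i - 1) [])
          (PySem.List.pyGetD (lineups.map (fun lu => PySem.List.sorted (PySem.Set.ofList lu) (fun x => x) false)) i [])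
          ls))
        = (List.range (lineups.length - 1)).map (vcmuTri lineups ls) := by
      rw [hrange, List.map_map]
      apply List.map_congr_left
      intro k hk
      rw [List.mem_range] at hk
      simp only [Function.comp]
      have e1 : (1 : Int) + (k : Int) - 1 = ((k : Nat) : Int) := by ring
      have e2 : (1 : Int) + (k : Int) = ((k + 1 : Nat) : Int) := by push_cast; ring
      rw [e1, PySem.List.pyGetD_natCast]
      rw [e2, PySem.List.pyGetD_natCast]
      have hk1 : k < lineups.length := by omega
      have hk2 : k + 1 < lineups.length := by omega
      have g1 : (lineups.map (fun lu => PySem.List.sorted (PySem.Set.ofList lu) (fun x => x) false)).getD k []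
          = PySem.List.sorted (PySem.Set.ofList (lineups.getD k [])) (fun x => x) false := by
        rw [List.getD_eq_getElem _ _ (by simpa using hk1), List.getElem_map,
          List.getD_eq_getElem _ _ hk1]
      have g2 : (lineups.map (fun lu => PySem.List.sorted (PySem.Set.ofList lu) (fun x => x) false)).getD (k + 1) []
          = PySem.List.sorted (PySem.Set.ofList (lineups.getD (k + 1) [])) (fun x => x) false := by
        rw [List.getD_eq_getElem _ _ (by simpa using hk2), List.getElem_map,
          List.getD_eq_getElem _ _ hk2]
      rw [g1, g2]
      unfold vcmuPairStat vcmuTri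
      rw [vcmuMergeOverlap_spec]
      refine Prod.ext (by push_cast; ring) (Prod.ext ?_ rfl)
      cases ls with
      | none => simp [PySem.Set.len, PySem.List.length_sorted]
      | some v =>
        by_cases hv : v = 0
        · simp [hv, PySem.Set.len, PySem.List.length_sorted]
        · simp [hv]
    have hmin? : PySem.List.min? ((t0 :: tl).map (fun (t : Int × Int × Int) => t.2.1)) (fun c => c)
        = some ((tl.map (fun (t : Int × Int × Int) => t.2.1)).foldl min t0.2.1) := by
      rw [List.map_cons]
      exact vcmu_min_fold _ _
    simp only [hB, hPeq, hmin?, Option.getD_some]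

-- ===== VERDICT (by name: the statement is the Claim_ definition above) =====
theorem verify_consecutive_min_uniques_spec : Claim_unchanged_verify_consecutive_min_uniques := by
  intro lineups mu ls _
  unfold Spec_verify_consecutive_min_uniques
  intro hD
  by_cases h2 : 2 ≤ lineups.length
  · obtain ⟨t0, tl, hPeq, hAe, hBe⟩ := vcmu_eval lineups mu ls h2
    rw [hAe, hBe]
    unfold D_verify_consecutive_min_uniques at hD
    push Not at hD
    obtain ⟨k, hk, hck⟩ := hD h2
    have hck2 : (vcmuTri lineups ls k).2.1 < 1000000 := by
      by_contra hge
      have := (vcmu_changes_iff lineups ls k).mpr (by omega)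
      omega
    have hmem : (vcmuTri lineups ls k).2.1 ∈ (t0 :: tl).map (fun (t : Int × Int × Int) => t.2.1) := by
      rw [← hPeq, List.map_map]
      exact List.mem_map.2 ⟨k, List.mem_range.2 hk, rfl⟩
    have hle : (tl.map (fun (t : Int × Int × Int) => t.2.1)).foldl min t0.2.1
        ≤ (vcmuTri lineups ls k).2.1 := by
      rw [List.map_cons] at hmem
      rcases List.mem_cons.1 hmem with h | h
      · rw [← h]
        exact vcmu_foldl_min_le_init _ _
      · exact vcmu_foldl_min_le _ _ _ h
    have hmlt : (tl.map (fun (t : Int × Int × Int) => t.2.1)).foldl min t0.2.1 < 1000000 :=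
      lt_of_le_of_lt hle hck2
    rw [min_eq_right hmlt.le, if_pos (by omega)]
  · have h1 : ((lineups.length : Int)) ≤ 1 := by
      have : lineups.length ≤ 1 := by omega
      exact_mod_cast this
    unfold verify_consecutive_min_uniques verify_consecutive_min_uniques_alt
    rw [if_pos h1, if_pos h1]

theorem verify_consecutive_min_uniques_changed : Claim_changed_verify_consecutive_min_uniques := by
  unfold Claim_changed_verify_consecutive_min_uniques; decide

theorem verify_consecutive_min_uniques_tight : Claim_exact_verify_consecutive_min_uniques := by
  unfold Claim_exact_verify_consecutive_min_uniques
  intro lineups mu ls _ hD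
  obtain ⟨h2, hall⟩ := hD
  obtain ⟨t0, tl, hPeq, hAe, hBe⟩ := vcmu_eval lineups mu ls h2
  have hbound : ∀ a ∈ (t0 :: tl).map (fun (t : Int × Int × Int) => t.2.1), (1000000 : Int) ≤ a := by
    intro a ha
    rw [← hPeq, List.map_map] at ha
    obtain ⟨k, hk, rfl⟩ := List.mem_map.1 ha
    exact (vcmu_changes_iff lineups ls k).mp (hall k (List.mem_range.1 hk))
  have ht0 : (1000000 : Int) ≤ t0.2.1 := hbound _ (by simp)
  have htl : ∀ a ∈ tl.map (fun (t : Int × Int × Int) => t.2.1), (1000000 : Int) ≤ a := by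
    intro a ha
    exact hbound a (by simp [ha])
  have hm : (1000000 : Int) ≤ (tl.map (fun (t : Int × Int × Int) => t.2.1)).foldl min t0.2.1 :=
    vcmu_le_foldl_min _ _ _ ht0 htl
  intro heq
  rw [hAe, hBe] at heq
  have h21 := congrArg (fun r : Int × Int × (List (Int × Int × Int)) => r.2.1) heq
  simp only [min_eq_left hm] at h21
  rw [if_neg (by omega)] at h21
  omega
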